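-- pv_equiv track=rewrite | github.com/ademrzz/IA | neural_scoring.py | _compter_seances_adjacentes
-- ===== SOURCE A (Python) =====
-- from typing import Dict, List, Tuple, Optional
--
-- def _compter_seances_adjacentes(jour: int, tranche: int, schedule: Dict) -> int:
--     """Compte les séances adjacentes (tranche précédente et suivante)"""
--     count = 0
--
--     # Vérifier tranche précédente
--     if tranche > 1:
--         for seance in schedule.values():
--             if seance.get('jour') == jour and seance.get('tranche') == tranche - 1:
--                 count += 1
--
--     # Vérifier tranche suivante
--     if tranche < 6:
--         for seance in schedule.values():
--             if seance.get('jour') == jour and seance.get('tranche') == tranche + 1: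
--                 count += 1
--
--     return count
-- ===== SOURCE B (Python) =====
-- def _compter_seances_adjacentes(jour: int, tranche: int, schedule) -> int:
--     """Compte les séances adjacentes via une table de fréquences (jour, tranche)."""
--     counts = {}
--     for seance in schedule.values():
--         key = (seance.get('jour'), seance.get('tranche'))
--         counts[key] = counts.get(key, 0) + 1
--     total = 0
--     if tranche > 1:
--         total += counts.get((jour, tranche - 1), 0)
--     if tranche < 6:
--         total += counts.get((jour, tranche + 1), 0)
--     return total
-- ===== Notes on version B (the rewrite author's own statement) =====
-- stated objective: alternative
-- what changed: B replaces A's two guarded full scans of the schedule (one per adjacent slot) with a single pass that builds a (jour, tranche) frequency table, then answers by two table lookups with the same boundary guards.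
import Mathlib
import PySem

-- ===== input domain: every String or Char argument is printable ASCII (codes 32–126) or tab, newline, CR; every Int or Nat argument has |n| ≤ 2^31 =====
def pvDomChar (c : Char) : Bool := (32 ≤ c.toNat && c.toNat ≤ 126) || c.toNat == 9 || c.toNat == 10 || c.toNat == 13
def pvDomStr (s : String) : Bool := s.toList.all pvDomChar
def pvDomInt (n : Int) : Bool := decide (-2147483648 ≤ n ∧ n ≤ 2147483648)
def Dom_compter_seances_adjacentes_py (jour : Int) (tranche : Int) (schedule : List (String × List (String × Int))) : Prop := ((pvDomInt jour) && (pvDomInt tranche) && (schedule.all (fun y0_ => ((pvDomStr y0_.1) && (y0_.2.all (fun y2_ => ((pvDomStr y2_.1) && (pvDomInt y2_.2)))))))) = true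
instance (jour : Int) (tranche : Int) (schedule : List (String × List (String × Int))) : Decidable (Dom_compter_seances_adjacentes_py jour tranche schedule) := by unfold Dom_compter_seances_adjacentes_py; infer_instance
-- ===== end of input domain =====

-- B counts with one pass and a frequency table instead of A's two scans; return values proved equal everywhere.

-- ===== PORT A =====
-- seance.get('k') on the inner dict (association list, first match)
def pvGetField (seance : List (String × Int)) (k : String) : Option Int :=
  (PySem.Dict.mk seance).get? k

def compter_seances_adjacentes_py (jour : Int) (tranche : Int) (schedule : List (String × List (String × Int))) : Int :=
  let count : Int := 0
  let count := if tranche > 1 then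
      schedule.foldl (fun c p =>
        if pvGetField p.2 "jour" == some jour && pvGetField p.2 "tranche" == some (tranche - 1)
        then c + 1 else c) count
    else count
  let count := if tranche < 6 then
      schedule.foldl (fun c p =>
        if pvGetField p.2 "jour" == some jour && pvGetField p.2 "tranche" == some (tranche + 1)
        then c + 1 else c) count
    else count
  count

-- ===== PORT B =====
-- the (jour, tranche) key of one seance
def pvKey (seance : List (String × Int)) : Option Int × Option Int :=
  ((PySem.Dict.mk seance).get? "jour", (PySem.Dict.mk seance).get? "tranche")

def compter_seances_adjacentes_py_alt (jour : Int) (tranche : Int) (schedule : List (String × List (String × Int))) : Int :=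
  let counts : PySem.Dict (Option Int × Option Int) Int :=
    schedule.foldl (fun d p =>
      let key := pvKey p.2
      d.insert key (d.getD key 0 + 1)) PySem.Dict.empty
  let total : Int := 0
  let total := if tranche > 1 then total + counts.getD (some jour, some (tranche - 1)) 0 else total
  let total := if tranche < 6 then total + counts.getD (some jour, some (tranche + 1)) 0 else total
  total

-- ===== PRECONDITION & SPEC =====
def Spec_compter_seances_adjacentes_py (jour : Int) (tranche : Int) (schedule : List (String × List (String × Int))) (out : Int) : Prop := out = compter_seances_adjacentes_py_alt jour tranche schedule
instance (jour : Int) (tranche : Int) (schedule : List (String × List (String × Int))) (out : Int) : Decidable (Spec_compter_seances_adjacentes_py jour tranche schedule out) := by unfold Spec_compter_seances_adjacentes_py; infer_instance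

-- ===== CLAIM (what is proved, stated in full; the proofs are below) =====
def Claim_equal_compter_seances_adjacentes_py : Prop := ∀ (jour : Int) (tranche : Int) (schedule : List (String × List (String × Int))), Dom_compter_seances_adjacentes_py jour tranche schedule → Spec_compter_seances_adjacentes_py jour tranche schedule (compter_seances_adjacentes_py jour tranche schedule)

-- ===== LEMMAS AND PROOFS =====

-- B's frequency table (from any starting dict) looked up at key t adds the count of seances keyed t.
lemma counts_getD (schedule : List (String × List (String × Int)))
    (d : PySem.Dict (Option Int × Option Int) Int) (t : Option Int × Option Int) :
    (schedule.foldl (fun d p =>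
      let key := pvKey p.2
      d.insert key (d.getD key 0 + 1)) d).getD t 0
    = d.getD t 0 + ((schedule.map (fun p => pvKey p.2)).count t : Int) := by
  induction schedule generalizing d with
  | nil => simp
  | cons hd tl ih =>
    simp only [List.foldl_cons, List.map_cons, List.count_cons, ih]
    rw [PySem.Dict.getD_insert]
    by_cases h : pvKey hd.2 = t
    · have hb : (pvKey hd.2 == t) = true := beq_iff_eq.mpr h
      rw [if_pos h.symm, hb, h]
      simp only [if_true]
      push_cast
      ring
    · have hb : (pvKey hd.2 == t) = false := beq_eq_false_iff_ne.mpr h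
      rw [if_neg (fun hc => h hc.symm), hb]
      push_cast
      ring

-- A's one scan counts exactly the seances whose key is the target.
lemma scan_eq_count (schedule : List (String × List (String × Int))) (j t c : Int) :
    schedule.foldl (fun c p =>
      if pvGetField p.2 "jour" == some j && pvGetField p.2 "tranche" == some t
      then c + 1 else c) c
    = c + ((schedule.map (fun p => pvKey p.2)).count (some j, some t) : Int) := by
  induction schedule generalizing c with
  | nil => simp
  | cons hd tl ih =>
    have hiff : (pvGetField hd.2 "jour" == some j && pvGetField hd.2 "tranche" == some t) = true
        ↔ pvKey hd.2 = ((some j, some t) : Option Int × Option Int) := by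
      simp [pvKey, pvGetField, Prod.ext_iff]
    simp only [List.foldl_cons, List.map_cons, List.count_cons, ih]
    by_cases h : pvKey hd.2 = ((some j, some t) : Option Int × Option Int)
    · have hb : (pvKey hd.2 == ((some j, some t) : Option Int × Option Int)) = true :=
        beq_iff_eq.mpr h
      rw [if_pos (hiff.mpr h), hb]
      simp only [if_true]
      push_cast
      ring
    · have hb : (pvKey hd.2 == ((some j, some t) : Option Int × Option Int)) = false :=
        beq_eq_false_iff_ne.mpr h
      rw [if_neg (fun hc => h (hiff.mp hc)), hb]
      push_cast
      ring

-- ===== VERDICT (by name: the statement is the Claim_ definition above) =====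
theorem compter_seances_adjacentes_py_spec : Claim_equal_compter_seances_adjacentes_py := by
  intro jour tranche schedule _
  show _ = _
  simp only [compter_seances_adjacentes_py, compter_seances_adjacentes_py_alt]
  by_cases h1 : tranche > 1 <;> by_cases h2 : tranche < 6 <;>
    simp only [if_pos, h1, h2, if_false, scan_eq_count, counts_getD,
      PySem.Dict.getD_empty] <;> ring
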